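-- pv_equiv track=rewrite | github.com/Suge8/bao | app/backend/_heartbeat_common.py | _strip_line_prefix
-- ===== SOURCE A (Python) =====
-- def _strip_line_prefix(text: str) -> str:
--     normalized = text.strip()
--     for prefix in ("- [ ] ", "- [x] ", "- [X] ", "- ", "* "):
--         if normalized.startswith(prefix):
--             return normalized[len(prefix) :].strip()
--     parts = normalized.split(". ", 1)
--     if len(parts) == 2 and parts[0].isdigit():
--         return parts[1].strip()
--     return normalized
-- ===== SOURCE B (Python) =====
-- def _strip_line_prefix(text: str) -> str:
--     s = text.strip()
--     n = _prefix_len(s)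
--     return s[n:].strip() if n else s
--
--
-- def _prefix_len(s: str) -> int:
--     """Length of a markdown list/checkbox/number prefix of s, or 0."""
--     if s.startswith("* "):
--         return 2
--     if s.startswith("- "):
--         return 6 if s[2:6] in ("[ ] ", "[x] ", "[X] ") else 2
--     i = 0
--     while i < len(s) and s[i].isdigit():
--         i += 1
--     if i and s[i:i + 2] == ". ":
--         return i + 2
--     return 0
-- ===== Notes on version B (the rewrite author's own statement) =====
-- stated objective: alternative
-- what changed: B computes a single prefix length by direct character inspection (a maximal leading digit run checked against a following dot-space, and a take-4 comparison for checkbox markers) instead of A's ordered startswith loop over five prefixes plus a split-once pass on the dot-space separator, then slices once.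
import Mathlib
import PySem

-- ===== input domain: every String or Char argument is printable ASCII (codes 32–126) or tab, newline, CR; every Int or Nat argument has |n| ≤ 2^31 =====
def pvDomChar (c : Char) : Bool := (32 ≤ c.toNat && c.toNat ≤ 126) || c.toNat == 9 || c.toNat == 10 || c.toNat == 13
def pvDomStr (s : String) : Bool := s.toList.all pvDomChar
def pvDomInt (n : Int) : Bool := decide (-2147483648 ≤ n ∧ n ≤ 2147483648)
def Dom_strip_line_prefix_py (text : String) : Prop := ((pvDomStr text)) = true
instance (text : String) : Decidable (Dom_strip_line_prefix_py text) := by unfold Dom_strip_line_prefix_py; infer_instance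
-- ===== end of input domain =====

-- B strips one computed prefix length found by direct character inspection (maximal digit
-- run checked against a following ". ", take-4 comparison for checkbox markers) instead of
-- A's startswith loop plus split(". ", 1); an alternative of the same cost, not faster.

-- ===== PORT A =====
-- the tuple of prefixes A iterates over, in order
def pyPrefixesA : List String := ["- [ ] ", "- [x] ", "- [X] ", "- ", "* "]

-- the for-loop with early return: first matching prefix wins
def stripLoopA : List String → String → Option String
  | [], _ => none
  | p :: ps, normalized =>
      if PySem.Str.startswith normalized p then
        some (PySem.Str.strip (PySem.Str.slice normalized (some (PySem.Str.len p)) none))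
      else stripLoopA ps normalized

def strip_line_prefix_py (text : String) : String :=
  let normalized := PySem.Str.strip text
  match stripLoopA pyPrefixesA normalized with
  | some r => r
  | none =>
      -- parts = normalized.split(". ", 1); len(parts) == 2 expressed as the two-element pattern
      match PySem.Str.splitMax? normalized ". " 1 with
      | some [p0, p1] =>
          if PySem.Str.strIsdigit p0 then PySem.Str.strip p1 else normalized
      | _ => normalized

-- ===== PORT B =====
-- the while-loop counting leading digits is the takeWhile length (exact: both test one char);
-- s[2:6] / s[i:i+2] comparisons against 4-/2-char literals are drop/take equality (exact)
def prefixLenB (s : List Char) : Nat :=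
  if PySem.Chars.startswith s "* ".toList then 2
  else if PySem.Chars.startswith s "- ".toList then
    (if (s.drop 2).take 4 = "[ ] ".toList ∨ (s.drop 2).take 4 = "[x] ".toList ∨
        (s.drop 2).take 4 = "[X] ".toList then 6 else 2)
  else
    let i := (s.takeWhile PySem.Chars.isdigit).length
    if i ≠ 0 ∧ (s.drop i).take 2 = ". ".toList then i + 2 else 0

def strip_line_prefix_py_alt (text : String) : String :=
  let s := PySem.Str.strip text
  let n := prefixLenB s.toList
  if n ≠ 0 then PySem.Str.strip (String.ofList (s.toList.drop n)) else s

-- ===== PRECONDITION & SPEC =====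
def Spec_strip_line_prefix_py (text : String) (out : String) : Prop := out = strip_line_prefix_py_alt text
instance (text : String) (out : String) : Decidable (Spec_strip_line_prefix_py text out) := by unfold Spec_strip_line_prefix_py; infer_instance

-- ===== CLAIM (what is proved, stated in full; the proofs are below) =====
def Claim_equal_strip_line_prefix_py : Prop := ∀ (text : String), Dom_strip_line_prefix_py text → Spec_strip_line_prefix_py text (strip_line_prefix_py text)

-- ===== LEMMAS AND PROOFS =====

-- first occurrence split: none if sep does not occur in l, else (before, after) at the first occurrence
def firstSplit (sep : List Char) : List Char → Option (List Char × List Char)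
  | [] => none
  | c :: rest =>
      if sep.isPrefixOf (c :: rest) then some ([], (c :: rest).drop sep.length)
      else (firstSplit sep rest).map (fun pq => (c :: pq.1, pq.2))

theorem go_zero (sep : List Char) (fuel : Nat) (l cur : List Char) (acc : List (List Char)) :
    PySem.Chars.splitOnMax.go sep fuel 0 l cur acc = ((cur.reverse ++ l) :: acc).reverse := by
  match fuel, l with
  | 0, l => rw [PySem.Chars.splitOnMax.go]
  | fuel+1, [] => rw [PySem.Chars.splitOnMax.go] <;> simp
  | fuel+1, c :: rest => rw [PySem.Chars.splitOnMax.go] <;> simp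

theorem go_one (sep : List Char) (fuel : Nat) :
    ∀ (l cur : List Char) (acc : List (List Char)), l.length < fuel →
    PySem.Chars.splitOnMax.go sep fuel 1 l cur acc =
      match firstSplit sep l with
      | none => ((cur.reverse ++ l) :: acc).reverse
      | some (pre, post) => ((cur.reverse ++ pre) :: acc).reverse ++ [post] := by
  induction fuel with
  | zero => intro l cur acc h; omega
  | succ fuel ih =>
    intro l cur acc h
    match l with
    | [] => rw [PySem.Chars.splitOnMax.go] <;> simp [firstSplit]
    | c :: rest =>
      rw [PySem.Chars.splitOnMax.go]
      simp only [firstSplit]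
      by_cases hp : sep.isPrefixOf (c :: rest)
      · simp only [hp, if_true]
        rw [go_zero]
        simp
      · simp only [hp, if_false, Bool.false_eq_true, reduceIte]
        rw [ih rest (c :: cur) acc (by simpa using Nat.lt_of_succ_lt_succ h)]
        cases hfs : firstSplit sep rest with
        | none => simp
        | some pq => cases pq with | mk pre post => simp

theorem splitOnMax_one (sep : List Char) (l : List Char) :
    PySem.Chars.splitOnMax l sep 1 =
      match firstSplit sep l with
      | none => [l]
      | some (pre, post) => [pre, post] := by
  rw [PySem.Chars.splitOnMax]
  norm_num
  rw [go_one sep (l.length + 1) l [] [] (by omega)]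
  cases hfs : firstSplit sep l with
  | none => simp
  | some pq => cases pq with | mk pre post => simp

theorem digits_take (l : List Char)
    (h0 : (l.takeWhile PySem.Chars.isdigit).length ≠ 0) :
    PySem.Chars.strIsdigit (l.takeWhile PySem.Chars.isdigit) = true := by
  have h1 : l.takeWhile PySem.Chars.isdigit ≠ [] := by
    intro h; rw [h] at h0; simp at h0
  simp only [PySem.Chars.strIsdigit, Bool.and_eq_true, List.isEmpty_eq_false_iff, ne_eq,
    Bool.not_eq_true', List.all_eq_true]
  exact ⟨h1, fun c hc => List.mem_takeWhile_imp hc⟩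

theorem fs_pos (l : List Char)
    (h0 : (l.takeWhile PySem.Chars.isdigit).length ≠ 0)
    (h2 : (l.drop (l.takeWhile PySem.Chars.isdigit).length).take 2 = ['.', ' ']) :
    firstSplit ['.', ' '] l =
      some (l.take (l.takeWhile PySem.Chars.isdigit).length,
            l.drop ((l.takeWhile PySem.Chars.isdigit).length + 2)) := by
  induction l with
  | nil => simp at h0
  | cons c rest ih =>
    have hc : PySem.Chars.isdigit c = true := by
      by_contra hc
      rw [List.takeWhile_cons, if_neg (by simpa using hc)] at h0
      simp at h0
    have hdot : ('.' == c) = false := by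
      cases h : ('.' == c)
      · rfl
      · exfalso
        have hce : c = '.' := by have := beq_iff_eq.mp h; exact this.symm
        rw [hce] at hc; simp [PySem.Chars.isdigit] at hc
    have hnp : (['.', ' '] : List Char).isPrefixOf (c :: rest) = false := by
      simp [List.isPrefixOf, hdot]
    have htw : (c :: rest).takeWhile PySem.Chars.isdigit = c :: rest.takeWhile PySem.Chars.isdigit := by
      rw [List.takeWhile_cons, if_pos hc]
    rw [firstSplit, hnp]
    simp only [Bool.false_eq_true, if_false]
    rw [htw] at h2 ⊢
    simp only [List.length_cons, List.drop_succ_cons, List.take_succ_cons] at h2 ⊢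
    by_cases hz : (rest.takeWhile PySem.Chars.isdigit).length = 0
    · rw [hz] at h2 ⊢
      simp only [List.drop_zero] at h2
      obtain ⟨t, ht⟩ : ∃ t, rest = '.' :: ' ' :: t := by
        cases rest with
        | nil => simp at h2
        | cons a as =>
          cases as with
          | nil => simp at h2
          | cons b bs =>
            have hab : a = '.' ∧ b = ' ' := by
              have := h2
              simp only [List.take_succ_cons, List.take_zero, List.cons.injEq] at this
              exact ⟨this.1, this.2.1⟩
            exact ⟨bs, by rw [hab.1, hab.2]⟩
      rw [ht]
      simp [firstSplit, List.isPrefixOf]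
    · rw [ih hz h2]
      simp

theorem strIsdigit_cons (c : Char) (p : List Char) :
    PySem.Chars.strIsdigit (c :: p) = (PySem.Chars.isdigit c && p.all PySem.Chars.isdigit) := by
  simp [PySem.Chars.strIsdigit]

theorem fs_neg (l : List Char)
    (h : ¬ ((l.takeWhile PySem.Chars.isdigit).length ≠ 0 ∧
            (l.drop (l.takeWhile PySem.Chars.isdigit).length).take 2 = ['.', ' '])) :
    ∀ pre post, firstSplit ['.', ' '] l = some (pre, post) →
      PySem.Chars.strIsdigit pre = false := by
  induction l with
  | nil => intro pre post hfs; simp [firstSplit] at hfs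
  | cons c rest ih =>
    intro pre post hfs
    rw [firstSplit] at hfs
    by_cases hp : (['.', ' '] : List Char).isPrefixOf (c :: rest)
    · rw [if_pos hp] at hfs
      obtain ⟨h1, -⟩ := by simpa using hfs
      rw [h1]
      simp [PySem.Chars.strIsdigit]
    · rw [if_neg hp] at hfs
      obtain ⟨⟨pre', post'⟩, hfs', hpq⟩ := Option.map_eq_some_iff.mp hfs
      obtain ⟨hpre, hpost⟩ : c :: pre' = pre ∧ post' = post := by
        have := hpq
        simp only [Prod.mk.injEq] at this
        exact this
      by_cases hc : PySem.Chars.isdigit c = true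
      · have htw : (c :: rest).takeWhile PySem.Chars.isdigit = c :: rest.takeWhile PySem.Chars.isdigit := by
          rw [List.takeWhile_cons, if_pos hc]
        rw [htw] at h
        simp only [List.length_cons, List.drop_succ_cons, ne_eq, Nat.succ_ne_zero,
          not_false_eq_true, true_and, not_and] at h
        have hne2 : (rest.drop (rest.takeWhile PySem.Chars.isdigit).length).take 2 ≠ ['.', ' '] := by
          intro hh; exact h hh
        cases hpre' : pre' with
        | nil =>
          -- firstSplit rest = some ([], post') forces ". " to be a prefix of rest
          exfalso
          cases rest with
          | nil => simp [firstSplit] at hfs'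
          | cons a as =>
            rw [firstSplit] at hfs'
            by_cases hpa : (['.', ' '] : List Char).isPrefixOf (a :: as)
            · obtain ⟨t, ht⟩ : ∃ t, a :: as = '.' :: ' ' :: t := by
                obtain ⟨t, ht⟩ := List.isPrefixOf_iff_prefix.mp hpa
                exact ⟨t, ht.symm⟩
              rw [ht] at hne2
              have : List.takeWhile PySem.Chars.isdigit ('.' :: ' ' :: t) = [] := by
                rw [List.takeWhile_cons, if_neg (by simp [PySem.Chars.isdigit])]
              rw [this] at hne2
              simp at hne2
            · rw [if_neg hpa] at hfs'
              obtain ⟨⟨q1, q2⟩, -, hq⟩ := Option.map_eq_some_iff.mp hfs'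
              have : a :: q1 = pre' := (Prod.mk.inj (by simpa using hq)).1
              rw [hpre'] at this; simp at this
        | cons a pre'' =>
          have hall : pre'.all PySem.Chars.isdigit = false := by
            have := ih (by intro hh; exact hne2 hh.2) pre' post' hfs'
            rw [hpre'] at this ⊢
            rw [strIsdigit_cons] at this
            simpa using this
          rw [← hpre, strIsdigit_cons]
          rw [hpre'] at hall ⊢
          simp only [List.all_cons, Bool.and_eq_false_iff] at hall ⊢
          rcases hall with h1 | h2
          · right; left; exact h1
          · right; right; exact h2
      · rw [← hpre, strIsdigit_cons]
        simp [Bool.eq_false_iff.mpr hc]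


theorem bnot_of_not_true (b : Bool) (h : ¬ b = true) : b = false := by
  cases b
  · rfl
  · exact absurd rfl h

theorem take_eq_append (t p : List Char) (k : Nat) (h : t.take k = p) : ∃ u, t = p ++ u :=
  ⟨t.drop k, by rw [← h, List.take_append_drop]⟩

theorem sliceEq (n : String) (k : Nat) :
    PySem.Str.strip (PySem.Str.slice n (some ((k : Int))) none) =
      PySem.Str.strip (String.ofList (n.toList.drop k)) := by
  apply String.toList_inj.mp
  simp [PySem.Str.toList_strip, PySem.Str.toList_slice, PySem.Chars.slice,
    PySem.List.slice_from_natCast]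

-- any prefix of "- …" forces a "- " prefix; used to knock out the checkbox tests at once
theorem prefix_trans_false (p q : List Char) (l : List Char)
    (hpq : p <+: q) (h : p.isPrefixOf l = false) : q.isPrefixOf l = false := by
  cases hq : q.isPrefixOf l
  · rfl
  · exfalso
    have := List.isPrefixOf_iff_prefix.mpr (hpq.trans (List.isPrefixOf_iff_prefix.mp hq))
    rw [this] at h; exact Bool.true_eq_false.mp h

theorem key (n : String) :
    (match stripLoopA pyPrefixesA n with
      | some r => r
      | none =>
          match PySem.Str.splitMax? n ". " 1 with
          | some [p0, p1] =>
              if PySem.Str.strIsdigit p0 then PySem.Str.strip p1 else n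
          | _ => n) =
    (if prefixLenB n.toList ≠ 0
     then PySem.Str.strip (String.ofList (n.toList.drop (prefixLenB n.toList))) else n) := by
  by_cases hs : ("* ".toList).isPrefixOf n.toList = true
  · -- "* " branch
    obtain ⟨t, ht⟩ := List.isPrefixOf_iff_prefix.mp hs
    have hl : n.toList = '*' :: ' ' :: t := ht.symm
    have e1 : PySem.Str.startswith n "- [ ] " = false := by
      simp [PySem.Chars.startswith, hl, List.isPrefixOf]
    have e2 : PySem.Str.startswith n "- [x] " = false := by
      simp [PySem.Chars.startswith, hl, List.isPrefixOf]
    have e3 : PySem.Str.startswith n "- [X] " = false := by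
      simp [PySem.Chars.startswith, hl, List.isPrefixOf]
    have e4 : PySem.Str.startswith n "- " = false := by
      simp [PySem.Chars.startswith, hl, List.isPrefixOf]
    have e5 : PySem.Str.startswith n "* " = true := by
      simp [PySem.Chars.startswith, hl, List.isPrefixOf]
    have hb : prefixLenB n.toList = 2 := by
      rw [prefixLenB, if_pos (by simpa [PySem.Chars.startswith] using hs)]
    simp only [stripLoopA, pyPrefixesA, e1, e2, e3, e4, e5, Bool.false_eq_true, if_false,
      if_true, hb]
    have hlen : PySem.Str.len "* " = ((2 : Nat) : Int) := by
      decide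
    rw [hlen, sliceEq]
    norm_num
  · by_cases hd : ("- ".toList).isPrefixOf n.toList = true
    · -- "- " branches
      obtain ⟨t, ht⟩ := List.isPrefixOf_iff_prefix.mp hd
      have hl : n.toList = '-' :: ' ' :: t := ht.symm
      have e5 : PySem.Str.startswith n "* " = false := by
        simp [PySem.Chars.startswith, hl, List.isPrefixOf]
      have e4 : PySem.Str.startswith n "- " = true := by
        simp [PySem.Chars.startswith, hl, List.isPrefixOf]
      have hdrop : n.toList.drop 2 = t := by rw [hl]; rfl
      have hbS : PySem.Chars.startswith n.toList "* ".toList = false := by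
        simp only [PySem.Chars.startswith]; exact bnot_of_not_true _ hs
      have hbD : PySem.Chars.startswith n.toList "- ".toList = true := by
        simpa [PySem.Chars.startswith] using hd
      by_cases c1 : t.take 4 = "[ ] ".toList
      · obtain ⟨u, hu⟩ := take_eq_append t ("[ ] ".toList) 4 c1
        have hu : t = '[' :: ' ' :: ']' :: ' ' :: u := by simpa using hu
        have e1 : PySem.Str.startswith n "- [ ] " = true := by
          simp [PySem.Chars.startswith, hl, hu, List.isPrefixOf]
        have hb : prefixLenB n.toList = 6 := by
          rw [prefixLenB, if_neg (by simp only [PySem.Chars.startswith]; exact hs), if_pos (by simp only [PySem.Chars.startswith]; exact hd), if_pos (by rw [hdrop]; left; exact c1)]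
        simp only [stripLoopA, pyPrefixesA, e1, if_true, hb]
        have hlen : PySem.Str.len "- [ ] " = ((6 : Nat) : Int) := by
          decide
        rw [hlen, sliceEq]
        norm_num
      · by_cases c2 : t.take 4 = "[x] ".toList
        · obtain ⟨u, hu⟩ := take_eq_append t ("[x] ".toList) 4 c2
          have hu : t = '[' :: 'x' :: ']' :: ' ' :: u := by simpa using hu
          have e1 : PySem.Str.startswith n "- [ ] " = false := by
            simp [PySem.Chars.startswith, hl, hu, List.isPrefixOf]
          have e2 : PySem.Str.startswith n "- [x] " = true := by
            simp [PySem.Chars.startswith, hl, hu, List.isPrefixOf]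
          have hb : prefixLenB n.toList = 6 := by
            rw [prefixLenB, if_neg (by simp only [PySem.Chars.startswith]; exact hs), if_pos (by simp only [PySem.Chars.startswith]; exact hd),
              if_pos (by rw [hdrop]; right; left; exact c2)]
          simp only [stripLoopA, pyPrefixesA, e1, e2, Bool.false_eq_true, if_false, if_true, hb]
          have hlen : PySem.Str.len "- [x] " = ((6 : Nat) : Int) := by
            decide
          rw [hlen, sliceEq]
          norm_num
        · by_cases c3 : t.take 4 = "[X] ".toList
          · obtain ⟨u, hu⟩ := take_eq_append t ("[X] ".toList) 4 c3
            have hu : t = '[' :: 'X' :: ']' :: ' ' :: u := by simpa using hu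
            have e1 : PySem.Str.startswith n "- [ ] " = false := by
              simp [PySem.Chars.startswith, hl, hu, List.isPrefixOf]
            have e2 : PySem.Str.startswith n "- [x] " = false := by
              simp [PySem.Chars.startswith, hl, hu, List.isPrefixOf]
            have e3 : PySem.Str.startswith n "- [X] " = true := by
              simp [PySem.Chars.startswith, hl, hu, List.isPrefixOf]
            have hb : prefixLenB n.toList = 6 := by
              rw [prefixLenB, if_neg (by simp only [PySem.Chars.startswith]; exact hs), if_pos (by simp only [PySem.Chars.startswith]; exact hd),
                if_pos (by rw [hdrop]; right; right; exact c3)]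
            simp only [stripLoopA, pyPrefixesA, e1, e2, e3, Bool.false_eq_true, if_false,
              if_true, hb]
            have hlen : PySem.Str.len "- [X] " = ((6 : Nat) : Int) := by
              decide
            rw [hlen, sliceEq]
            norm_num
          · -- bare "- " prefix, no checkbox
            have hq1 : ("- [ ] ".toList).isPrefixOf n.toList = false := by
              cases hq : ("- [ ] ".toList).isPrefixOf n.toList
              · rfl
              · exfalso
                obtain ⟨u, hu⟩ := List.isPrefixOf_iff_prefix.mp hq
                rw [hl] at hu
                have hteq : '[' :: ' ' :: ']' :: ' ' :: u = t := by
                  have h2 := hu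
                  simp only [show ("- [ ] ".toList : List Char) = ['-', ' ', '[', ' ', ']', ' '] from rfl,
                    List.cons_append, List.nil_append, List.cons.injEq, true_and] at h2
                  exact h2
                exact c1 (by rw [← hteq]; rfl)
            have hq2 : ("- [x] ".toList).isPrefixOf n.toList = false := by
              cases hq : ("- [x] ".toList).isPrefixOf n.toList
              · rfl
              · exfalso
                obtain ⟨u, hu⟩ := List.isPrefixOf_iff_prefix.mp hq
                rw [hl] at hu
                have hteq : '[' :: 'x' :: ']' :: ' ' :: u = t := by
                  have h2 := hu
                  simp only [show ("- [x] ".toList : List Char) = ['-', ' ', '[', 'x', ']', ' '] from rfl,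
                    List.cons_append, List.nil_append, List.cons.injEq, true_and] at h2
                  exact h2
                exact c2 (by rw [← hteq]; rfl)
            have hq3 : ("- [X] ".toList).isPrefixOf n.toList = false := by
              cases hq : ("- [X] ".toList).isPrefixOf n.toList
              · rfl
              · exfalso
                obtain ⟨u, hu⟩ := List.isPrefixOf_iff_prefix.mp hq
                rw [hl] at hu
                have hteq : '[' :: 'X' :: ']' :: ' ' :: u = t := by
                  have h2 := hu
                  simp only [show ("- [X] ".toList : List Char) = ['-', ' ', '[', 'X', ']', ' '] from rfl,
                    List.cons_append, List.nil_append, List.cons.injEq, true_and] at h2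
                  exact h2
                exact c3 (by rw [← hteq]; rfl)
            have e1 : PySem.Str.startswith n "- [ ] " = false := by
              simpa [PySem.Chars.startswith] using hq1
            have e2 : PySem.Str.startswith n "- [x] " = false := by
              simpa [PySem.Chars.startswith] using hq2
            have e3 : PySem.Str.startswith n "- [X] " = false := by
              simpa [PySem.Chars.startswith] using hq3
            have hb : prefixLenB n.toList = 2 := by
              rw [prefixLenB, if_neg (by simp only [PySem.Chars.startswith]; exact hs), if_pos (by simp only [PySem.Chars.startswith]; exact hd),
                if_neg (by rw [hdrop]; rintro (h | h | h); exacts [c1 h, c2 h, c3 h])]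
            simp only [stripLoopA, pyPrefixesA, e1, e2, e3, e4, Bool.false_eq_true, if_false,
              if_true, hb]
            have hlen : PySem.Str.len "- " = ((2 : Nat) : Int) := by
              decide
            rw [hlen, sliceEq]
            norm_num
    · -- no list-marker prefix: the split(". ", 1) branch vs the digit-run branch
      have hq1 : ("- [ ] ".toList).isPrefixOf n.toList = false :=
        prefix_trans_false "- ".toList "- [ ] ".toList n.toList (by decide)
          (bnot_of_not_true _ hd)
      have hq2 : ("- [x] ".toList).isPrefixOf n.toList = false :=
        prefix_trans_false "- ".toList "- [x] ".toList n.toList (by decide)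
          (bnot_of_not_true _ hd)
      have hq3 : ("- [X] ".toList).isPrefixOf n.toList = false :=
        prefix_trans_false "- ".toList "- [X] ".toList n.toList (by decide)
          (bnot_of_not_true _ hd)
      have e1 : PySem.Str.startswith n "- [ ] " = false := by
        simpa [PySem.Chars.startswith] using hq1
      have e2 : PySem.Str.startswith n "- [x] " = false := by
        simpa [PySem.Chars.startswith] using hq2
      have e3 : PySem.Str.startswith n "- [X] " = false := by
        simpa [PySem.Chars.startswith] using hq3
      have e4 : PySem.Str.startswith n "- " = false := by
        simp only [PySem.Str.startswith_eq, PySem.Chars.startswith]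
        exact bnot_of_not_true _ hd
      have e5 : PySem.Str.startswith n "* " = false := by
        simp only [PySem.Str.startswith_eq, PySem.Chars.startswith]
        exact bnot_of_not_true _ hs
      have hbS : PySem.Chars.startswith n.toList "* ".toList = false := by
        simp only [PySem.Chars.startswith]; exact bnot_of_not_true _ hs
      have hbD : PySem.Chars.startswith n.toList "- ".toList = false := by
        simp only [PySem.Chars.startswith]; exact bnot_of_not_true _ hd
      simp only [stripLoopA, pyPrefixesA, e1, e2, e3, e4, e5, Bool.false_eq_true, if_false]
      have hsplit : PySem.Str.splitMax? n ". " 1 =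
          some (List.map String.ofList (PySem.Chars.splitOnMax n.toList (". ".toList) 1)) := by
        rw [PySem.Str.splitMax?, PySem.Chars.splitMax?, if_neg (by decide)]
        rfl
      have hsep : (". ".toList : List Char) = ['.', ' '] := by decide
      rw [hsplit, hsep, splitOnMax_one]
      set i := (n.toList.takeWhile PySem.Chars.isdigit).length with hi
      by_cases hcond : i ≠ 0 ∧ (n.toList.drop i).take 2 = ['.', ' ']
      · rw [fs_pos n.toList hcond.1 hcond.2]
        have hb : prefixLenB n.toList = i + 2 := by
          rw [prefixLenB, if_neg (by simp only [PySem.Chars.startswith]; exact hs), if_neg (by simp only [PySem.Chars.startswith]; exact hd),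
            if_pos (by rw [hsep]; exact hcond)]
        have htake : List.take (List.takeWhile PySem.Chars.isdigit n.toList).length n.toList =
            List.takeWhile PySem.Chars.isdigit n.toList :=
          (List.prefix_iff_eq_take.mp (List.takeWhile_prefix _)).symm
        have hdig : PySem.Chars.strIsdigit
            (List.take (List.takeWhile PySem.Chars.isdigit n.toList).length n.toList) = true := by
          rw [htake]
          exact digits_take n.toList hcond.1
        simp only [List.map, PySem.Str.strIsdigit_eq, String.toList_ofList, hdig, if_true, hb]
        norm_num
        rw [hi]
      · have hb : prefixLenB n.toList = 0 := by
          rw [prefixLenB, if_neg (by simp only [PySem.Chars.startswith]; exact hs), if_neg (by simp only [PySem.Chars.startswith]; exact hd),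
            if_neg (by rw [hsep]; exact hcond)]
        cases hfs : firstSplit ['.', ' '] n.toList with
        | none => simp only [List.map, hb]; norm_num
        | some pq =>
          cases pq with
          | mk pre post =>
            have hdig : PySem.Str.strIsdigit (String.ofList pre) = false := by
              rw [PySem.Str.strIsdigit_eq]
              simpa using fs_neg n.toList hcond pre post hfs
            simp only [List.map, hdig, Bool.false_eq_true, if_false, hb]
            norm_num

-- ===== VERDICT (by name: the statement is the Claim_ definition above) =====
theorem strip_line_prefix_py_spec : Claim_equal_strip_line_prefix_py := by
  intro text _
  unfold Spec_strip_line_prefix_py strip_line_prefix_py strip_line_prefix_py_alt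
  exact key (PySem.Str.strip text)
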